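-- pv_equiv track=rewrite | github.com/hs-apotell/UHDM | model_gen/vpi_user_cpp.py | _make_vpi_name
-- ===== SOURCE A (Python) =====
-- def _make_vpi_name(classname):
--     vpiclasstype = f'vpi{classname[:1].upper() + classname[1:]}'
--
--     underscore = False
--     vpict = vpiclasstype
--     vpiclasstype = ''
--     for ch in vpict:
--         if ch == '_':
--           underscore = True
--         elif underscore:
--             vpiclasstype += ch.upper()
--             underscore = False
--         else:
--             vpiclasstype += ch
--
--     overrides = {
--       'vpiForkStmt': 'vpiFork',
--       'vpiForStmt': 'vpiFor',
--       'vpiIoDecl': 'vpiIODecl',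
--       'vpiClockingIoDecl': 'vpiClockingIODecl',
--       'vpiTfCall': 'vpiSysTfCall',
--       'vpiAtomicStmt': 'vpiStmt',
--       'vpiAssertStmt': 'vpiAssert',
--       'vpiClockedProperty': 'vpiClockedProp',
--       'vpiIfStmt': 'vpiIf',
--       'vpiWhileStmt': 'vpiWhile',
--       'vpiCaseStmt': 'vpiCase',
--       'vpiContinueStmt': 'vpiContinue',
--       'vpiBreakStmt': 'vpiBreak',
--       'vpiReturnStmt': 'vpiReturn',
--       'vpiProcessStmt': 'vpiProcess',
--       'vpiForeverStmt': 'vpiForever',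
--       'vpiConstrForeach': 'vpiConstrForEach',
--       'vpiFinalStmt': 'vpiFinal',
--       'vpiWaitStmt': 'vpiWait',
--       'vpiThreadObj': 'vpiThread',
--       'vpiSwitchTran': 'vpiSwitch',
--     }
--
--     return overrides.get(vpiclasstype, vpiclasstype)
-- ===== SOURCE B (Python) =====
-- def _make_vpi_name(classname):
--     # single lookahead scan over 'vpi_' + classname: the injected '_' makes the
--     # first classname character uppercase, so no separate prefix-capitalize step
--     s = 'vpi_' + classname
--     n = len(s)
--     out = []
--     i = 0
--     while i < n:
--         if s[i] != '_':
--             out.append(s[i])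
--             i += 1
--         elif i + 1 < n and s[i + 1] != '_':
--             out.append(s[i + 1].upper())
--             i += 2
--         else:
--             i += 1
--     name = ''.join(out)
--
--     overrides = {
--       'vpiForkStmt': 'vpiFork',
--       'vpiForStmt': 'vpiFor',
--       'vpiIoDecl': 'vpiIODecl',
--       'vpiClockingIoDecl': 'vpiClockingIODecl',
--       'vpiTfCall': 'vpiSysTfCall',
--       'vpiAtomicStmt': 'vpiStmt',
--       'vpiAssertStmt': 'vpiAssert',
--       'vpiClockedProperty': 'vpiClockedProp',
--       'vpiIfStmt': 'vpiIf',
--       'vpiWhileStmt': 'vpiWhile',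
--       'vpiCaseStmt': 'vpiCase',
--       'vpiContinueStmt': 'vpiContinue',
--       'vpiBreakStmt': 'vpiBreak',
--       'vpiReturnStmt': 'vpiReturn',
--       'vpiProcessStmt': 'vpiProcess',
--       'vpiForeverStmt': 'vpiForever',
--       'vpiConstrForeach': 'vpiConstrForEach',
--       'vpiFinalStmt': 'vpiFinal',
--       'vpiWaitStmt': 'vpiWait',
--       'vpiThreadObj': 'vpiThread',
--       'vpiSwitchTran': 'vpiSwitch',
--     }
--
--     return overrides.get(name, name)
-- ===== Notes on version B (the rewrite author's own statement) =====
-- stated objective: alternative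
-- what changed: Replaces A's two-stage pass (capitalize-first-letter prefix build, then a for-loop carrying an underscore-seen flag) with a single lookahead scan over the prefixed string (vpi, an injected underscore, then classname) that consumes one character, or two at an underscore, per step; the injected underscore makes the first classname letter uppercase so the separate prefix-capitalisation step disappears.
import Mathlib
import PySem

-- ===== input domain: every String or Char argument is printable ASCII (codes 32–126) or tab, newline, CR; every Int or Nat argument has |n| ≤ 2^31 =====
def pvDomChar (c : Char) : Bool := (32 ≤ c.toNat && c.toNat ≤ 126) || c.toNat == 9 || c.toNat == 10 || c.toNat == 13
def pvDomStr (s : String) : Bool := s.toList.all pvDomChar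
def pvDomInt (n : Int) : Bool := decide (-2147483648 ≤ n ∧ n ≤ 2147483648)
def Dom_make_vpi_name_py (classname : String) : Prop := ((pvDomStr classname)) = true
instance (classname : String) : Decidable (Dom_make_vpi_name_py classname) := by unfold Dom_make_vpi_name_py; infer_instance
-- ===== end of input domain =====

-- B replaces A's flag-carrying for-loop (prefix-capitalize then underscore state machine) with a single lookahead scan over the underscore-prefixed input that consumes one or two characters per step; return-value equivalence proved on all inputs.


-- ===== PORT A =====
-- the overrides dict (identical literal in A and B)
def pvOverrides : PySem.Dict String String := PySem.Dict.mk
  [ ("vpiForkStmt", "vpiFork"), ("vpiForStmt", "vpiFor"), ("vpiIoDecl", "vpiIODecl"),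
    ("vpiClockingIoDecl", "vpiClockingIODecl"), ("vpiTfCall", "vpiSysTfCall"),
    ("vpiAtomicStmt", "vpiStmt"), ("vpiAssertStmt", "vpiAssert"),
    ("vpiClockedProperty", "vpiClockedProp"), ("vpiIfStmt", "vpiIf"),
    ("vpiWhileStmt", "vpiWhile"), ("vpiCaseStmt", "vpiCase"),
    ("vpiContinueStmt", "vpiContinue"), ("vpiBreakStmt", "vpiBreak"),
    ("vpiReturnStmt", "vpiReturn"), ("vpiProcessStmt", "vpiProcess"),
    ("vpiForeverStmt", "vpiForever"), ("vpiConstrForeach", "vpiConstrForEach"),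
    ("vpiFinalStmt", "vpiFinal"), ("vpiWaitStmt", "vpiWait"),
    ("vpiThreadObj", "vpiThread"), ("vpiSwitchTran", "vpiSwitch") ]

-- f'vpi{classname[:1].upper() + classname[1:]}'  (A's first line)
def pvPrefix (cs : List Char) : List Char :=
  ['v','p','i'] ++ PySem.Chars.upper (PySem.List.slice cs none (some 1))
    ++ PySem.List.slice cs (some 1) none

-- one iteration of A's for-loop: state = (underscore flag, output so far)
def pvStepA (st : Bool × List Char) (ch : Char) : Bool × List Char :=
  if ch = '_' then (true, st.2)
  else if st.1 then (false, st.2 ++ [PySem.Chars.upperChar ch])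
  else (st.1, st.2 ++ [ch])

def make_vpi_name_py (classname : String) : String :=
  let vpict := pvPrefix classname.toList
  let res := (vpict.foldl pvStepA (false, [])).2
  let s := String.ofList res
  pvOverrides.getD s s

-- ===== PORT B =====
-- B's while loop over the remaining characters: at a non-underscore emit it and
-- advance one; at an underscore followed by a non-underscore emit that character
-- uppercased and advance two; otherwise just advance one.
def pvScanB : List Char → List Char
  | [] => []
  | c :: rest =>
    if c ≠ '_' then c :: pvScanB rest
    else
      match rest with
      | d :: rest2 =>
        if d ≠ '_' then PySem.Chars.upperChar d :: pvScanB rest2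
        else pvScanB (d :: rest2)
      | [] => pvScanB []

def make_vpi_name_py_alt (classname : String) : String :=
  let name := String.ofList (pvScanB (('v' :: 'p' :: 'i' :: '_' :: []) ++ classname.toList))
  pvOverrides.getD name name

-- ===== PRECONDITION & SPEC =====
def Spec_make_vpi_name_py (classname : String) (out : String) : Prop := out = make_vpi_name_py_alt classname
instance (classname : String) (out : String) : Decidable (Spec_make_vpi_name_py classname out) := by unfold Spec_make_vpi_name_py; infer_instance

-- ===== CLAIM (what is proved, stated in full; the proofs are below) =====
def Claim_equal_make_vpi_name_py : Prop := ∀ (classname : String), Dom_make_vpi_name_py classname → Spec_make_vpi_name_py classname (make_vpi_name_py classname)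

-- ===== LEMMAS AND PROOFS =====

-- uppercasing never produces an underscore
theorem pvUpper_ne_underscore (c : Char) (h : c ≠ '_') : PySem.Chars.upperChar c ≠ '_' := by
  unfold PySem.Chars.upperChar PySem.Chars.islower
  split
  · rename_i hl
    simp only [Bool.and_eq_true, decide_eq_true_eq, Char.le_def, UInt32.le_iff_toNat_le] at hl
    have h1 : 97 ≤ c.toNat := hl.1
    have h2 : c.toNat ≤ 122 := hl.2
    intro heq
    have h3 := congrArg Char.toNat heq
    rw [Char.toNat_ofNat, if_pos (by left; omega : (c.toNat - 32).isValidChar)] at h3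
    have h4 : Char.toNat '_' = 95 := by decide
    omega
  · exact h

-- unfolding equations for pvScanB's four step shapes
theorem pvScanB_cons_ne (c : Char) (rest : List Char) (hc : c ≠ '_') :
    pvScanB (c :: rest) = c :: pvScanB rest := by
  conv_lhs => rw [pvScanB.eq_def]
  simp [hc]

theorem pvScanB_uu (rest : List Char) : pvScanB ('_' :: '_' :: rest) = pvScanB ('_' :: rest) := by
  conv_lhs => rw [pvScanB.eq_def]
  simp

theorem pvScanB_u_ne (c : Char) (rest : List Char) (hc : c ≠ '_') :
    pvScanB ('_' :: c :: rest) = PySem.Chars.upperChar c :: pvScanB rest := by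
  conv_lhs => rw [pvScanB.eq_def]
  simp [hc]

-- A's flag-carrying fold computes B's lookahead scan (flag true = a pending underscore)
theorem pvFoldA_eq (l : List Char) : ∀ (u : Bool) (acc : List Char),
    (l.foldl pvStepA (u, acc)).2
      = acc ++ (if u then pvScanB ('_' :: l) else pvScanB l) := by
  induction l with
  | nil => intro u acc; cases u <;> simp [pvScanB]
  | cons c rest ih =>
    intro u acc
    by_cases hc : c = '_'
    · subst hc
      have hstep : pvStepA (u, acc) '_' = (true, acc) := by simp [pvStepA]
      rw [List.foldl_cons, hstep, ih true acc]
      cases u <;> simp [pvScanB_uu]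
    · cases u with
      | true =>
        have hstep : pvStepA (true, acc) c = (false, acc ++ [PySem.Chars.upperChar c]) := by
          simp [pvStepA, hc]
        rw [List.foldl_cons, hstep, ih false _, pvScanB_u_ne c rest hc]
        simp
      | false =>
        have hstep : pvStepA (false, acc) c = (false, acc ++ [c]) := by simp [pvStepA, hc]
        rw [List.foldl_cons, hstep, ih false _, pvScanB_cons_ne c rest hc]
        simp

-- prepending the underscore is the same as uppercasing the first character
theorem pvScanB_underscore (cs : List Char) :
    pvScanB ('_' :: cs)
      = pvScanB (PySem.Chars.upper (PySem.List.slice cs none (some 1))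
                  ++ PySem.List.slice cs (some 1) none) := by
  cases cs with
  | nil =>
    rw [PySem.List.slice_to _ (by norm_num : (0:Int) ≤ 1), PySem.List.slice_from_one]
    simp [PySem.Chars.upper, pvScanB]
  | cons c rest =>
    rw [PySem.List.slice_to _ (by norm_num : (0:Int) ≤ 1), PySem.List.slice_from_one]
    by_cases hc : c = '_'
    · subst hc
      simp [PySem.Chars.upper, show PySem.Chars.upperChar '_' = '_' from by decide,
            pvScanB_uu]
    · have hu := pvUpper_ne_underscore c hc
      simp [PySem.Chars.upper, pvScanB_u_ne c rest hc, pvScanB_cons_ne _ rest hu]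

-- ===== VERDICT (by name: the statement is the Claim_ definition above) =====
theorem make_vpi_name_py_spec : Claim_equal_make_vpi_name_py := by
  intro classname _
  unfold Spec_make_vpi_name_py
  have key : (List.foldl pvStepA (false, []) (pvPrefix classname.toList)).2
      = pvScanB (('v' :: 'p' :: 'i' :: '_' :: []) ++ classname.toList) := by
    rw [pvFoldA_eq (pvPrefix classname.toList) false []]
    simp only [Bool.false_eq_true, if_false, List.nil_append]
    unfold pvPrefix
    simp only [List.cons_append, List.nil_append]
    rw [pvScanB_cons_ne _ _ (by decide), pvScanB_cons_ne _ _ (by decide),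
        pvScanB_cons_ne _ _ (by decide), pvScanB_cons_ne _ _ (by decide),
        pvScanB_cons_ne _ _ (by decide), pvScanB_cons_ne _ _ (by decide),
        ← pvScanB_underscore classname.toList]
  simp only [make_vpi_name_py, make_vpi_name_py_alt, key]
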